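-- pv_equiv track=rewrite | github.com/paha2315/tradeCompany_With_Test | Program/atributeParser/main.py | joinToDict
-- ===== SOURCE A (Python) =====
-- def join(src1: dict, src2: dict) -> dict:
--     result = src1.copy()
--     for key, val in src2.items():
--         if key not in result:
--             result[key] = val
--     return dict(sorted(result.items(), key=lambda a: a[0]))
--
-- def joinToDict(L: list) -> dict:
--     result = dict()
--     for item in L:
--         if item[0] in result:
--             result[item[0]] = join(item[1], result[item[0]])
--         else:
--             result[item[0]] = item[1]
--     return dict(sorted(result.items(), key=lambda a: a[0]))
-- ===== SOURCE B (Python) =====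
-- def joinToDict(L: list) -> dict:
--     # Group the inner dicts by outer key, then handle each key once:
--     # a key seen once passes its dict through; a key seen several times
--     # gets its dicts merged (later occurrences win) and key-sorted.
--     groups = {}
--     for key, d in L:
--         groups.setdefault(key, []).append(d)
--     result = {}
--     for key in sorted(groups):
--         dicts = groups[key]
--         if len(dicts) == 1:
--             result[key] = dicts[0]
--         else:
--             merged = {}
--             for d in dicts:
--                 merged.update(d)
--             result[key] = dict(sorted(merged.items()))
--     return result
-- ===== Notes on version B (the rewrite author's own statement) =====
-- stated objective: alternative
-- what changed: B groups the inner dicts by outer key in one pass and then processes each distinct key exactly once over the sorted key list (pass a lone dict through; merge a group with later-wins precedence and sort it once), instead of A's incremental dict that copies and re-sorts the accumulated inner dict via join() on every repeated key and finally re-sorts the outer dict.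
import Mathlib
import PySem

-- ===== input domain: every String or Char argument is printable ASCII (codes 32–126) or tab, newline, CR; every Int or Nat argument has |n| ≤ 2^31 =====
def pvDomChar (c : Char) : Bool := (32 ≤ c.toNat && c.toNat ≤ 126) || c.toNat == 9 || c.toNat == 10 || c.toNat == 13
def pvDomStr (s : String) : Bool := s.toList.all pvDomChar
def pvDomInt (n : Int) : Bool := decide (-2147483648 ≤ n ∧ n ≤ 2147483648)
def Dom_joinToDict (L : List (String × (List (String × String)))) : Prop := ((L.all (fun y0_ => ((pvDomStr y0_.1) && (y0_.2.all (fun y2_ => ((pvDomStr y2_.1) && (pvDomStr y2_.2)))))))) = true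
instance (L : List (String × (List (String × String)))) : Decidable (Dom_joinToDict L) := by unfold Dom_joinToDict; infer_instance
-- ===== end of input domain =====

-- B groups the inner dicts by outer key and handles each distinct key once over the sorted key
-- list (a lone dict passes through; a group is merged later-wins and sorted once), replacing A's
-- incremental dict that re-joins and re-sorts on every repeated key; objective: alternative.

-- ===== PORT A =====
-- join: result = src1.copy(); for key, val in src2.items(): if key not in result: result[key] = val
def pvStepJoin (r : PySem.Dict String String) (kv : String × String) : PySem.Dict String String :=
  if r.contains kv.1 then r else r.insert kv.1 kv.2

def pvJoin (src1 src2 : PySem.Dict String String) : PySem.Dict String String :=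
  PySem.Dict.ofList (PySem.List.sorted (src2.items.foldl pvStepJoin src1).items (fun a => a.1))

-- body of A's loop over L
def pvStepA (res : PySem.Dict String (PySem.Dict String String))
    (item : String × List (String × String)) : PySem.Dict String (PySem.Dict String String) :=
  if res.contains item.1 then
    res.insert item.1 (pvJoin (PySem.Dict.ofList item.2) (res.getD item.1 PySem.Dict.empty))
  else
    res.insert item.1 (PySem.Dict.ofList item.2)

def joinToDict (L : List (String × (List (String × String)))) : List (String × List (String × String)) :=
  let result := L.foldl pvStepA PySem.Dict.empty
  (PySem.List.sorted result.items (fun a => a.1)).map (fun p => (p.1, p.2.items))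

-- ===== PORT B =====
-- groups.setdefault(key, []).append(d)
def pvStepG (g : PySem.Dict String (List (List (String × String))))
    (item : String × List (String × String)) : PySem.Dict String (List (List (String × String))) :=
  g.modify item.1 [] (· ++ [item.2])

-- merged = {}; for d in dicts: merged.update(d)
def pvMergeGroup (ds : List (List (String × String))) : PySem.Dict String String :=
  ds.foldl (fun m d => m.update d) PySem.Dict.empty

def joinToDict_alt (L : List (String × (List (String × String)))) : List (String × List (String × String)) :=
  let groups := L.foldl pvStepG PySem.Dict.empty
  let out := (PySem.List.sorted groups.keys (fun k => k)).foldl (fun o k =>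
    let ds := groups.getD k []
    o.insert k (if ds.length == 1 then (PySem.Dict.ofList (ds.headD [])).items
                else PySem.List.sorted (pvMergeGroup ds).items (fun q => q.1)))
    PySem.Dict.empty
  out.items

-- ===== PRECONDITION & SPEC =====
def Spec_joinToDict (L : List (String × (List (String × String)))) (out : List (String × List (String × String))) : Prop := out = joinToDict_alt L
instance (L : List (String × (List (String × String)))) (out : List (String × List (String × String))) : Decidable (Spec_joinToDict L out) := by unfold Spec_joinToDict; infer_instance

-- ===== CLAIM (what is proved, stated in full; the proofs are below) =====
def Claim_equal_joinToDict : Prop := ∀ (L : List (String × (List (String × String)))), Dom_joinToDict L → Spec_joinToDict L (joinToDict L)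

-- ===== LEMMAS AND PROOFS =====

-- canonical re-sort of an inner dict (what A's join produces, given its key/value mapping)
def pvSortD (d : PySem.Dict String String) : PySem.Dict String String :=
  PySem.Dict.ofList (PySem.List.sorted d.items (fun a => a.1))

-- proof-side intermediate form both programs are reduced to: merge incrementally with
-- last-wins inserts, count occurrences, sort the inner dict exactly at duplicated keys
def pvStepCnt (c : PySem.Dict String Int) (item : String × List (String × String)) : PySem.Dict String Int :=
  c.insert item.1 (c.getD item.1 0 + 1)

def pvStepB (m : PySem.Dict String (PySem.Dict String String))
    (item : String × List (String × String)) : PySem.Dict String (PySem.Dict String String) :=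
  if m.contains item.1 then
    m.insert item.1 ((m.getD item.1 PySem.Dict.empty).update item.2)
  else
    m.insert item.1 (PySem.Dict.ofList item.2)

def pvOldAlt (L : List (String × (List (String × String)))) : List (String × List (String × String)) :=
  let cnt := L.foldl pvStepCnt PySem.Dict.empty
  let merged := L.foldl pvStepB PySem.Dict.empty
  (PySem.List.sorted merged.items (fun p => p.1)).map (fun p =>
    (p.1, if cnt.getD p.1 0 > 1 then PySem.List.sorted p.2.items (fun q => q.1) else p.2.items))

-- get? after the fold inside join: first src1, else first match among the scanned items
theorem pv_get?_joinFold (l : List (String × String)) (acc : PySem.Dict String String) (k : String) :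
    (l.foldl pvStepJoin acc).get? k
      = (acc.get? k).or ((l.find? (fun p => p.1 == k)).map (fun p => p.2)) := by
  induction l generalizing acc with
  | nil => simp
  | cons p t ih =>
    rw [List.foldl_cons]
    by_cases hc : acc.contains p.1 = true
    · have hstep : pvStepJoin acc p = acc := by unfold pvStepJoin; rw [if_pos hc]
      rw [hstep, ih]
      by_cases hk : p.1 = k
      · subst hk
        have hsome : (acc.get? p.1).isSome := by
          rw [← PySem.Dict.contains_eq_isSome_get?]; exact hc
        obtain ⟨v, hv⟩ := Option.isSome_iff_exists.mp hsome
        rw [hv]; rfl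
      · rw [List.find?_cons_of_neg (p := fun q => q.1 == k) (a := p) (l := t) (by simp [hk])]
    · have hstep : pvStepJoin acc p = acc.insert p.1 p.2 := by unfold pvStepJoin; rw [if_neg hc]
      rw [hstep, ih]
      by_cases hk : p.1 = k
      · subst hk
        have hnone : acc.get? p.1 = none := by
          rw [PySem.Dict.contains_eq_isSome_get?] at hc
          cases hh : acc.get? p.1 with
          | none => rfl
          | some v => rw [hh] at hc; exact absurd rfl hc
        rw [PySem.Dict.get?_insert_self, hnone,
          List.find?_cons_of_pos (p := fun q => q.1 == p.1) (a := p) (l := t) (by simp)]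
        rfl
      · rw [PySem.Dict.get?_insert_of_ne _ _ (show k ≠ p.1 from fun h => hk h.symm),
            List.find?_cons_of_neg (p := fun q => q.1 == k) (a := p) (l := t) (by simp [hk])]

theorem pv_nodup_joinFold (l : List (String × String)) (acc : PySem.Dict String String)
    (h : acc.keys.Nodup) : (l.foldl pvStepJoin acc).keys.Nodup := by
  induction l generalizing acc with
  | nil => exact h
  | cons p t ih =>
    rw [List.foldl_cons]
    apply ih
    unfold pvStepJoin
    by_cases hc : acc.contains p.1 = true
    · rw [if_pos hc]; exact h
    · rw [if_neg hc]; exact PySem.Dict.nodup_keys_insert _ _ _ h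

-- get? after folding inserts (dict.update): last match in l wins, else the old dict
theorem pv_get?_insFold (l : List (String × String)) (d : PySem.Dict String String) (k : String) :
    (l.foldl (fun acc p => acc.insert p.1 p.2) d).get? k
      = ((l.reverse.find? (fun p => p.1 == k)).map (fun p => p.2)).or (d.get? k) := by
  induction l generalizing d with
  | nil => simp
  | cons p t ih =>
    rw [List.foldl_cons, ih, List.reverse_cons, List.find?_append]
    cases hf : t.reverse.find? (fun p => p.1 == k) with
    | some q => rfl
    | none =>
      simp only [Option.none_or, Option.map_none]
      by_cases hk : p.1 = k
      · subst hk
        rw [PySem.Dict.get?_insert_self,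
          List.find?_cons_of_pos (p := fun q => q.1 == p.1) (a := p) (l := []) (by simp)]
        rfl
      · rw [PySem.Dict.get?_insert_of_ne _ _ (show k ≠ p.1 from fun h => hk h.symm),
            List.find?_cons_of_neg (p := fun q => q.1 == k) (a := p) (l := []) (by simp [hk])]
        rfl

theorem pv_get?_update (l : List (String × String)) (d : PySem.Dict String String) (k : String) :
    (d.update l).get? k
      = ((l.reverse.find? (fun p => p.1 == k)).map (fun p => p.2)).or (d.get? k) :=
  pv_get?_insFold l d k

theorem pv_get?_ofList (l : List (String × String)) (k : String) :
    (PySem.Dict.ofList l).get? k = (l.reverse.find? (fun p => p.1 == k)).map (fun p => p.2) := by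
  rw [show PySem.Dict.ofList l = PySem.Dict.empty.update l from rfl, pv_get?_update,
      PySem.Dict.get?_empty, Option.or_none]

theorem pv_items_ofList {v : Type} (l : List (String × v)) (h : (l.map (fun p => p.1)).Nodup) :
    (PySem.Dict.ofList l).items = l := by
  have hfresh : ∀ a ∈ l, (PySem.Dict.empty : PySem.Dict String v).contains a.1 = false :=
    fun a _ => PySem.Dict.contains_empty a.1
  have := PySem.Dict.items_foldl_insert_fresh l (fun p => p.1) (fun p => p.2)
    PySem.Dict.empty hfresh h
  simpa using this

-- two dicts with equal lookups and duplicate-free keys have the same key-sorted item list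
theorem pv_sorted_items_eq (d e : PySem.Dict String String)
    (hd : d.keys.Nodup) (he : e.keys.Nodup) (h : ∀ k, d.get? k = e.get? k) :
    PySem.List.sorted d.items (fun a => a.1) = PySem.List.sorted e.items (fun a => a.1) := by
  have hd' : d.items.Nodup := List.Nodup.of_map (fun p : String × String => p.1)
    (show (d.items.map (fun p => p.1)).Nodup from hd)
  have he' : e.items.Nodup := List.Nodup.of_map (fun p : String × String => p.1)
    (show (e.items.map (fun p => p.1)).Nodup from he)
  have hperm : d.items.Perm e.items := by
    rw [List.perm_ext_iff_of_nodup hd' he']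
    rintro ⟨k, w⟩
    rw [← PySem.Dict.get?_eq_some_iff_mem_items d k w hd,
        ← PySem.Dict.get?_eq_some_iff_mem_items e k w he, h k]
  refine (PySem.List.sorted_eq_of_perm_of_pairwise_lt e.items
    (PySem.List.sorted d.items (fun a => a.1)) (fun a => a.1) ?_ ?_).symm
  · exact (PySem.List.sorted_perm d.items (fun a => a.1) false).trans hperm
  · have hle := PySem.List.sorted_pairwise d.items (fun a => a.1)
    have hmapnd : ((PySem.List.sorted d.items (fun a => a.1)).map (fun p => p.1)).Nodup :=
      (((PySem.List.sorted_perm d.items (fun a => a.1) false).map (fun p => p.1)).nodup_iff).mpr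
        (show (d.items.map (fun p => p.1)).Nodup from hd)
    have hne : (PySem.List.sorted d.items (fun a => a.1)).Pairwise (fun a b => a.1 ≠ b.1) :=
      List.pairwise_map.mp hmapnd
    exact (hle.and hne).imp (fun hab => lt_of_le_of_ne hab.1 hab.2)

theorem pv_nodup_sortD (d : PySem.Dict String String) : (pvSortD d).keys.Nodup :=
  PySem.Dict.nodup_keys_ofList _

theorem pv_items_sortD (d : PySem.Dict String String) (hd : d.keys.Nodup) :
    (pvSortD d).items = PySem.List.sorted d.items (fun a => a.1) := by
  unfold pvSortD
  apply pv_items_ofList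
  have hp : ((PySem.List.sorted d.items (fun a => a.1)).map (fun p => p.1)).Perm
      (d.items.map (fun p => p.1)) := (PySem.List.sorted_perm d.items (fun a => a.1) false).map _
  exact hp.nodup_iff.mpr (show (d.items.map (fun p => p.1)).Nodup from hd)

theorem pv_get?_sortD (d : PySem.Dict String String) (hd : d.keys.Nodup) (k : String) :
    (pvSortD d).get? k = d.get? k := by
  cases hh : d.get? k with
  | some w =>
    have hm : (k, w) ∈ d.items := (PySem.Dict.get?_eq_some_iff_mem_items d k w hd).mp hh
    exact (PySem.Dict.get?_eq_some_iff_mem_items _ k w (pv_nodup_sortD d)).mpr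
      (by rw [pv_items_sortD d hd]; exact (PySem.List.mem_sorted _ _ _ _).mpr hm)
  | none =>
    rw [PySem.Dict.get?_eq_none_iff_not_mem_keys] at hh ⊢
    intro hkm
    apply hh
    have hkeq : (pvSortD d).keys = (PySem.List.sorted d.items (fun a => a.1)).map (fun p => p.1) :=
      congrArg (fun l => l.map (fun p : String × String => p.1)) (pv_items_sortD d hd)
    rw [hkeq] at hkm
    simp only [List.mem_map] at hkm
    obtain ⟨p, hp, hpk⟩ := hkm
    have hpm : p ∈ d.items := (PySem.List.mem_sorted _ _ _ _).mp hp
    rw [← hpk]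
    exact List.mem_map_of_mem hpm

-- the sorted item list of a dict, written through its sorted key list
theorem pv_sorted_items_map {v : Type} (d : PySem.Dict String v) (hd : d.keys.Nodup) (dflt : v) :
    PySem.List.sorted d.items (fun a => a.1)
      = (PySem.List.sorted d.keys (fun k => k)).map (fun k => (k, d.getD k dflt)) := by
  refine PySem.List.sorted_eq_of_perm_of_pairwise_lt d.items
    ((PySem.List.sorted d.keys (fun k => k)).map (fun k => (k, d.getD k dflt))) (fun a => a.1) ?_ ?_
  · have hitems : d.items = d.keys.map (fun k => (k, d.getD k dflt)) :=
      PySem.Dict.items_eq_map_keys d hd dflt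
    rw [hitems]
    exact (PySem.List.sorted_perm d.keys (fun k => k) false).map _
  · rw [List.pairwise_map]
    have hle := PySem.List.sorted_pairwise d.keys (fun k => k)
    have hnd : (PySem.List.sorted d.keys (fun k => k)).Nodup :=
      ((PySem.List.sorted_perm d.keys (fun k => k) false).nodup_iff).mpr hd
    exact (hle.and hnd).imp (fun hab => lt_of_le_of_ne hab.1 hab.2)

-- loop bodies rewritten with the insert outside the branch (for the keys lemmas)
theorem pv_stepA_eq : pvStepA = fun res item => res.insert item.1
    (if res.contains item.1 then pvJoin (PySem.Dict.ofList item.2) (res.getD item.1 PySem.Dict.empty)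
     else PySem.Dict.ofList item.2) := by
  funext res item
  unfold pvStepA
  by_cases h : res.contains item.1 = true <;> simp [h]

theorem pv_stepB_eq : pvStepB = fun m item => m.insert item.1
    (if m.contains item.1 then (m.getD item.1 PySem.Dict.empty).update item.2
     else PySem.Dict.ofList item.2) := by
  funext m item
  unfold pvStepB
  by_cases h : m.contains item.1 = true <;> simp [h]

theorem pv_keys_A (L : List (String × List (String × String))) :
    (L.foldl pvStepA PySem.Dict.empty).keys = PySem.Set.update [] (L.map (fun i => i.1)) := by
  rw [pv_stepA_eq]
  have := PySem.Dict.keys_foldl_insert_key L (fun i : String × List (String × String) => i.1)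
    (fun res item => if res.contains item.1 then pvJoin (PySem.Dict.ofList item.2) (res.getD item.1 PySem.Dict.empty)
      else PySem.Dict.ofList item.2) PySem.Dict.empty
  rw [PySem.Dict.keys_empty] at this
  exact this

theorem pv_keys_B (L : List (String × List (String × String))) :
    (L.foldl pvStepB PySem.Dict.empty).keys = PySem.Set.update [] (L.map (fun i => i.1)) := by
  rw [pv_stepB_eq]
  have := PySem.Dict.keys_foldl_insert_key L (fun i : String × List (String × String) => i.1)
    (fun m item => if m.contains item.1 then (m.getD item.1 PySem.Dict.empty).update item.2
      else PySem.Dict.ofList item.2) PySem.Dict.empty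
  rw [PySem.Dict.keys_empty] at this
  exact this

theorem pv_keys_G (L : List (String × List (String × String))) :
    (L.foldl pvStepG PySem.Dict.empty).keys = PySem.Set.update [] (L.map (fun i => i.1)) := by
  have h := PySem.Dict.keys_foldl_modify_key L (fun i : String × List (String × String) => i.1)
    ([] : List (List (String × String))) (fun _ item => (fun x => x ++ [item.2])) PySem.Dict.empty
  rw [PySem.Dict.keys_empty] at h
  exact h

theorem pv_nodup_keys_A (L : List (String × List (String × String))) :
    (L.foldl pvStepA PySem.Dict.empty).keys.Nodup := by
  rw [pv_stepA_eq]
  exact PySem.Dict.nodup_keys_foldl_insert_key L (fun i => i.1) _ PySem.Dict.empty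
    (by rw [PySem.Dict.keys_empty]; exact List.nodup_nil)

theorem pv_nodup_keys_B (L : List (String × List (String × String))) :
    (L.foldl pvStepB PySem.Dict.empty).keys.Nodup := by
  rw [pv_stepB_eq]
  exact PySem.Dict.nodup_keys_foldl_insert_key L (fun i => i.1) _ PySem.Dict.empty
    (by rw [PySem.Dict.keys_empty]; exact List.nodup_nil)

theorem pv_nodup_keys_G (L : List (String × List (String × String))) :
    (L.foldl pvStepG PySem.Dict.empty).keys.Nodup := by
  have h := PySem.Dict.nodup_keys_foldl_modify_key L (fun i : String × List (String × String) => i.1)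
    ([] : List (List (String × String))) (fun _ item => (fun x => x ++ [item.2])) PySem.Dict.empty
    (by rw [PySem.Dict.keys_empty]; exact List.nodup_nil)
  exact h

-- each group is exactly the inner lists of the items carrying that key, in order
theorem pv_groups_getD (L : List (String × List (String × String))) (k : String) :
    (L.foldl pvStepG PySem.Dict.empty).getD k []
      = (L.filter (fun i => i.1 == k)).map (fun i => i.2) := by
  have h := PySem.Dict.getD_foldl_modify_append L PySem.Dict.empty k
  rw [PySem.Dict.getD_empty, List.nil_append] at h
  exact h

theorem pv_vals_nodup_B (rest : List (String × List (String × String)))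
    (mb : PySem.Dict String (PySem.Dict String String))
    (hvb : ∀ k v, mb.get? k = some v → v.keys.Nodup) :
    ∀ k v, (rest.foldl pvStepB mb).get? k = some v → v.keys.Nodup := by
  induction rest generalizing mb with
  | nil => exact hvb
  | cons p t ih =>
    rw [List.foldl_cons]
    apply ih
    intro k v hv
    unfold pvStepB at hv
    by_cases hc : mb.contains p.1 = true
    · rw [if_pos hc, PySem.Dict.get?_insert] at hv
      by_cases hk : k = p.1
      · rw [if_pos hk] at hv
        have hsome : (mb.get? p.1).isSome := by
          rw [← PySem.Dict.contains_eq_isSome_get?]; exact hc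
        obtain ⟨w, hw⟩ := Option.isSome_iff_exists.mp hsome
        rw [PySem.Dict.getD_of_get?_eq_some mb PySem.Dict.empty hw] at hv
        rw [← Option.some.inj hv]
        exact PySem.Dict.nodup_keys_update _ _ (hvb _ _ hw)
      · rw [if_neg hk] at hv
        exact hvb _ _ hv
    · rw [if_neg hc, PySem.Dict.get?_insert] at hv
      by_cases hk : k = p.1
      · rw [if_pos hk] at hv
        rw [← Option.some.inj hv]
        exact PySem.Dict.nodup_keys_ofList _
      · rw [if_neg hk] at hv
        exact hvb _ _ hv

theorem pv_cnt_getD' (L : List (String × List (String × String)))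
    (c : PySem.Dict String Int) (k : String) :
    (L.foldl pvStepCnt c).getD k 0 = c.getD k 0 + ((L.map (fun i => i.1)).count k : Int) := by
  induction L generalizing c with
  | nil => simp
  | cons p t ih =>
    rw [List.foldl_cons, ih]
    unfold pvStepCnt
    rw [PySem.Dict.getD_insert]
    simp only [List.map_cons, List.count_cons, beq_iff_eq]
    by_cases h : k = p.1
    · rw [if_pos h, if_pos h.symm]
      subst h
      push_cast
      ring
    · rw [if_neg h, if_neg (fun hh => h hh.symm)]
      push_cast
      ring

theorem pv_cnt_getD (L : List (String × List (String × String))) (k : String) :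
    (L.foldl pvStepCnt PySem.Dict.empty).getD k 0 = ((L.map (fun i => i.1)).count k : Int) := by
  rw [pv_cnt_getD', PySem.Dict.getD_empty, zero_add]

-- the outer-key count equals the length of that key's group
theorem pv_count_eq_group_length (L : List (String × List (String × String))) (k : String) :
    (L.map (fun i => i.1)).count k = ((L.filter (fun i => i.1 == k)).map (fun i => i.2)).length := by
  rw [List.length_map, List.count_eq_countP, List.countP_map, ← List.countP_eq_length_filter]
  rfl

-- what the incremental last-wins fold stores at k: the fold of update over k's group
theorem pv_merged_get? (L : List (String × List (String × String)))
    (m : PySem.Dict String (PySem.Dict String String)) (k : String) :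
    (L.foldl pvStepB m).get? k
      = (match m.get? k with
         | some v => some (((L.filter (fun i => i.1 == k)).map (fun i => i.2)).foldl
             (fun a d => a.update d) v)
         | none =>
           if (L.filter (fun i => i.1 == k)).isEmpty then none
           else some (((L.filter (fun i => i.1 == k)).map (fun i => i.2)).foldl
             (fun a d => a.update d) PySem.Dict.empty)) := by
  induction L generalizing m with
  | nil =>
    cases h : m.get? k <;> simp [h]
  | cons p t ih =>
    rw [List.foldl_cons, ih]
    by_cases hk : p.1 = k
    · have hfil : ((p :: t).filter (fun i => i.1 == k)) = p :: t.filter (fun i => i.1 == k) := by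
        simp [hk]
      rw [hfil]
      by_cases hc : m.contains p.1 = true
      · have hsome : (m.get? p.1).isSome := by
          rw [← PySem.Dict.contains_eq_isSome_get?]; exact hc
        obtain ⟨v0, hv0⟩ := Option.isSome_iff_exists.mp hsome
        have hstep : pvStepB m p = m.insert p.1 (v0.update p.2) := by
          unfold pvStepB
          rw [if_pos hc, PySem.Dict.getD_of_get?_eq_some m PySem.Dict.empty hv0]
        rw [hstep]
        have hget : (m.insert p.1 (v0.update p.2)).get? k = some (v0.update p.2) := by
          rw [← hk]; exact PySem.Dict.get?_insert_self _ _ _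
        have hv0k : m.get? k = some v0 := hk ▸ hv0
        rw [hget, hv0k]
        simp
      · have hnone : m.get? p.1 = none := by
          cases hh : m.get? p.1 with
          | none => rfl
          | some v =>
            rw [PySem.Dict.contains_eq_isSome_get?, hh] at hc
            exact absurd rfl hc
        have hstep : pvStepB m p = m.insert p.1 (PySem.Dict.ofList p.2) := by
          unfold pvStepB
          rw [if_neg (by rw [PySem.Dict.contains_eq_isSome_get?, hnone]; exact Bool.false_ne_true)]
        rw [hstep]
        have hget : (m.insert p.1 (PySem.Dict.ofList p.2)).get? k = some (PySem.Dict.ofList p.2) := by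
          rw [← hk]; exact PySem.Dict.get?_insert_self _ _ _
        have hnk : m.get? k = none := hk ▸ hnone
        rw [hget, hnk]
        simp only [List.map_cons, List.foldl_cons]
        rw [show PySem.Dict.ofList p.2 = PySem.Dict.empty.update p.2 from rfl]
        simp
    · have hfil : ((p :: t).filter (fun i => i.1 == k)) = t.filter (fun i => i.1 == k) := by
        simp [hk]
      rw [hfil]
      have hget : (pvStepB m p).get? k = m.get? k := by
        unfold pvStepB
        by_cases hc : m.contains p.1 = true
        · rw [if_pos hc]
          exact PySem.Dict.get?_insert_of_ne _ _ (fun h => hk h.symm)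
        · rw [if_neg hc]
          exact PySem.Dict.get?_insert_of_ne _ _ (fun h => hk h.symm)
      rw [hget]

-- the value B's output loop stores at key k
def pvValB (G : PySem.Dict String (List (List (String × String)))) (k : String) : List (String × String) :=
  if (G.getD k []).length == 1 then (PySem.Dict.ofList ((G.getD k []).headD [])).items
  else PySem.List.sorted (pvMergeGroup (G.getD k [])).items (fun q => q.1)

-- B's result equals the proof-side intermediate form
theorem pv_alt_eq_old (L : List (String × List (String × String))) :
    joinToDict_alt L = pvOldAlt L := by
  show ((PySem.List.sorted (L.foldl pvStepG PySem.Dict.empty).keys (fun k => k)).foldl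
      (fun o k => o.insert k (pvValB (L.foldl pvStepG PySem.Dict.empty) k)) PySem.Dict.empty).items
    = (PySem.List.sorted (L.foldl pvStepB PySem.Dict.empty).items (fun p => p.1)).map (fun p =>
        (p.1, if (L.foldl pvStepCnt PySem.Dict.empty).getD p.1 0 > 1
          then PySem.List.sorted p.2.items (fun q => q.1) else p.2.items))
  have hndG : (L.foldl pvStepG PySem.Dict.empty).keys.Nodup := pv_nodup_keys_G L
  have hndM : (L.foldl pvStepB PySem.Dict.empty).keys.Nodup := pv_nodup_keys_B L
  have hkeysGM : (L.foldl pvStepG PySem.Dict.empty).keys = (L.foldl pvStepB PySem.Dict.empty).keys := by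
    rw [pv_keys_G, pv_keys_B]
  have hksnd : (PySem.List.sorted (L.foldl pvStepG PySem.Dict.empty).keys (fun k => k)).Nodup :=
    ((PySem.List.sorted_perm (L.foldl pvStepG PySem.Dict.empty).keys (fun k => k) false).nodup_iff).mpr hndG
  -- the output accumulator: a fold of inserts over fresh distinct keys appends them in order
  have hout : ((PySem.List.sorted (L.foldl pvStepG PySem.Dict.empty).keys (fun k => k)).foldl
      (fun o k => o.insert k (pvValB (L.foldl pvStepG PySem.Dict.empty) k)) PySem.Dict.empty).items
    = (PySem.List.sorted (L.foldl pvStepG PySem.Dict.empty).keys (fun k => k)).map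
        (fun k => (k, pvValB (L.foldl pvStepG PySem.Dict.empty) k)) := by
    have h := PySem.Dict.items_foldl_insert_fresh
      (PySem.List.sorted (L.foldl pvStepG PySem.Dict.empty).keys (fun k => k)) (fun k => k)
      (pvValB (L.foldl pvStepG PySem.Dict.empty)) PySem.Dict.empty
      (fun a _ => PySem.Dict.contains_empty a) (by simpa using hksnd)
    rw [show (PySem.Dict.empty : PySem.Dict String (List (String × String))).items = [] from rfl,
      List.nil_append] at h
    exact h
  rw [hout, pv_sorted_items_map _ hndM PySem.Dict.empty, ← hkeysGM, List.map_map]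
  apply List.map_congr_left
  intro k hk
  have hkm : k ∈ (L.foldl pvStepG PySem.Dict.empty).keys := (PySem.List.mem_sorted _ _ _ _).mp hk
  have hcont : (L.foldl pvStepB PySem.Dict.empty).contains k = true :=
    (PySem.Dict.contains_iff_mem_keys _ _).mpr (hkeysGM ▸ hkm)
  have hds : (L.foldl pvStepG PySem.Dict.empty).getD k []
      = (L.filter (fun i => i.1 == k)).map (fun i => i.2) := pv_groups_getD L k
  have hM := pv_merged_get? L PySem.Dict.empty k
  rw [PySem.Dict.get?_empty] at hM
  have hne : ((L.filter (fun i => i.1 == k)).isEmpty) = false := by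
    cases he : (L.filter (fun i => i.1 == k)).isEmpty
    · rfl
    · rw [PySem.Dict.contains_eq_isSome_get?, hM] at hcont
      simp [he] at hcont
  rw [hne] at hM
  simp only [if_neg Bool.false_ne_true] at hM
  have hgD : (L.foldl pvStepB PySem.Dict.empty).getD k PySem.Dict.empty
      = pvMergeGroup ((L.foldl pvStepG PySem.Dict.empty).getD k []) := by
    rw [PySem.Dict.getD_of_get?_eq_some _ PySem.Dict.empty hM, hds]
    rfl
  have hcnt : (L.foldl pvStepCnt PySem.Dict.empty).getD k 0
      = (((L.foldl pvStepG PySem.Dict.empty).getD k []).length : Int) := by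
    rw [pv_cnt_getD, pv_count_eq_group_length, hds]
  simp only [Function.comp_def]
  rw [hgD, hcnt]
  unfold pvValB
  by_cases h1 : ((L.foldl pvStepG PySem.Dict.empty).getD k []).length = 1
  · -- a lone dict: both sides keep its insertion order
    obtain ⟨d, hd1⟩ : ∃ d, (L.foldl pvStepG PySem.Dict.empty).getD k [] = [d] :=
      List.length_eq_one_iff.mp h1
    rw [hd1]
    norm_num
    rfl
  · -- a merged group: both sides sort the merged dict once
    have hpos : 0 < ((L.foldl pvStepG PySem.Dict.empty).getD k []).length := by
      rw [hds, List.length_map, List.length_pos_iff]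
      intro hnil
      rw [hnil] at hne
      simp at hne
    have h2 : (1:Int) < (((L.foldl pvStepG PySem.Dict.empty).getD k []).length : Int) := by
      omega
    rw [if_neg (by simpa using h1), if_pos h2]

-- the central invariant: A's accumulated dict is B's, with pvSortD applied at duplicated keys
theorem pv_main (rest : List (String × List (String × String)))
    (ra mb : PySem.Dict String (PySem.Dict String String)) (dup : String → Prop)
    (hva : ∀ k v, ra.get? k = some v → v.keys.Nodup)
    (hvb : ∀ k v, mb.get? k = some v → v.keys.Nodup)
    (hc : ∀ k, ra.contains k = mb.contains k)
    (hd : ∀ k, dup k → mb.contains k = true)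
    (h1 : ∀ k, ¬ dup k → ra.get? k = mb.get? k)
    (h2 : ∀ k, dup k → ra.get? k = (mb.get? k).map pvSortD) :
    ∀ k,
      ((dup k ∨ (mb.contains k = true ∧ k ∈ rest.map (fun i => i.1)) ∨ 2 ≤ (rest.map (fun i => i.1)).count k) →
        (rest.foldl pvStepA ra).get? k = ((rest.foldl pvStepB mb).get? k).map pvSortD) ∧
      (¬ (dup k ∨ (mb.contains k = true ∧ k ∈ rest.map (fun i => i.1)) ∨ 2 ≤ (rest.map (fun i => i.1)).count k) →
        (rest.foldl pvStepA ra).get? k = (rest.foldl pvStepB mb).get? k) := by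
  induction rest generalizing ra mb dup with
  | nil =>
    intro k
    constructor
    · intro hcnd
      rcases hcnd with h | ⟨_, h⟩ | h
      · exact h2 k h
      · simp at h
      · simp at h
    · intro hcnd
      exact h1 k (fun h => hcnd (Or.inl h))
  | cons p t ih =>
    obtain ⟨k0, d0⟩ := p
    by_cases hc0 : mb.contains k0 = true
    · -- duplicate outer key: A re-joins (and sorts), B updates in place
      have hra : ra.contains k0 = true := by rw [hc]; exact hc0
      have hsome : (mb.get? k0).isSome := by
        rw [← PySem.Dict.contains_eq_isSome_get?]; exact hc0
      obtain ⟨v0, hv0⟩ := Option.isSome_iff_exists.mp hsome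
      have hv0nd : v0.keys.Nodup := hvb _ _ hv0
      have hgetDb : mb.getD k0 PySem.Dict.empty = v0 :=
        PySem.Dict.getD_of_get?_eq_some mb PySem.Dict.empty hv0
      obtain ⟨X, hX, hXnd, hXg⟩ :
          ∃ X, ra.get? k0 = some X ∧ X.keys.Nodup ∧ (∀ j, X.get? j = v0.get? j) := by
        by_cases hdup0 : dup k0
        · refine ⟨pvSortD v0, ?_, pv_nodup_sortD _, fun j => pv_get?_sortD v0 hv0nd j⟩
          rw [h2 k0 hdup0, hv0]; rfl
        · exact ⟨v0, by rw [h1 k0 hdup0, hv0], hv0nd, fun j => rfl⟩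
      have hgetDa : ra.getD k0 PySem.Dict.empty = X :=
        PySem.Dict.getD_of_get?_eq_some ra PySem.Dict.empty hX
      have hkey : pvJoin (PySem.Dict.ofList d0) X = pvSortD (v0.update d0) := by
        unfold pvJoin pvSortD
        congr 1
        apply pv_sorted_items_eq
        · exact pv_nodup_joinFold _ _ (PySem.Dict.nodup_keys_ofList _)
        · exact PySem.Dict.nodup_keys_update _ _ hv0nd
        · intro j
          rw [pv_get?_joinFold, pv_get?_update]
          have e1 : (X.items.find? (fun p => p.1 == j)).map (fun p => p.2) = X.get? j := rfl
          rw [e1, hXg j, pv_get?_ofList]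
      have hstepA : pvStepA ra (k0, d0) = ra.insert k0 (pvSortD (v0.update d0)) := by
        unfold pvStepA
        dsimp only
        rw [if_pos hra, hgetDa, hkey]
      have hstepB : pvStepB mb (k0, d0) = mb.insert k0 (v0.update d0) := by
        unfold pvStepB
        dsimp only
        rw [if_pos hc0, hgetDb]
      simp only [List.foldl_cons, hstepA, hstepB]
      have hva' : ∀ j v, (ra.insert k0 (pvSortD (v0.update d0))).get? j = some v → v.keys.Nodup := by
        intro j v hv
        rw [PySem.Dict.get?_insert] at hv
        by_cases hjk : j = k0
        · rw [if_pos hjk] at hv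
          rw [← Option.some.inj hv]
          exact pv_nodup_sortD _
        · rw [if_neg hjk] at hv
          exact hva _ _ hv
      have hvb' : ∀ j v, (mb.insert k0 (v0.update d0)).get? j = some v → v.keys.Nodup := by
        intro j v hv
        rw [PySem.Dict.get?_insert] at hv
        by_cases hjk : j = k0
        · rw [if_pos hjk] at hv
          rw [← Option.some.inj hv]
          exact PySem.Dict.nodup_keys_update _ _ hv0nd
        · rw [if_neg hjk] at hv
          exact hvb _ _ hv
      have hc' : ∀ j, (ra.insert k0 (pvSortD (v0.update d0))).contains j
          = (mb.insert k0 (v0.update d0)).contains j := by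
        intro j
        rw [PySem.Dict.contains_insert, PySem.Dict.contains_insert, hc]
      have hd' : ∀ j, (dup j ∨ j = k0) → (mb.insert k0 (v0.update d0)).contains j = true := by
        intro j hj
        rw [PySem.Dict.contains_insert]
        rcases hj with h | h
        · rw [hd j h, Bool.or_true]
        · subst h; simp
      have h1' : ∀ j, ¬ (dup j ∨ j = k0) →
          (ra.insert k0 (pvSortD (v0.update d0))).get? j = (mb.insert k0 (v0.update d0)).get? j := by
        intro j hj
        have hnd : ¬ dup j := fun h => hj (Or.inl h)
        have hne : j ≠ k0 := fun h => hj (Or.inr h)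
        rw [PySem.Dict.get?_insert, PySem.Dict.get?_insert, if_neg hne, if_neg hne]
        exact h1 j hnd
      have h2' : ∀ j, (dup j ∨ j = k0) →
          (ra.insert k0 (pvSortD (v0.update d0))).get? j
            = ((mb.insert k0 (v0.update d0)).get? j).map pvSortD := by
        intro j hj
        rw [PySem.Dict.get?_insert, PySem.Dict.get?_insert]
        by_cases hjk : j = k0
        · rw [if_pos hjk, if_pos hjk]; rfl
        · rw [if_neg hjk, if_neg hjk]
          exact h2 j (hj.resolve_right hjk)
      intro k
      have H := ih (ra.insert k0 (pvSortD (v0.update d0))) (mb.insert k0 (v0.update d0))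
        (fun j => dup j ∨ j = k0) hva' hvb' hc' hd' h1' h2' k
      have hiff : (dup k ∨ (mb.contains k = true ∧ k ∈ List.map (fun i => i.1) ((k0, d0) :: t)) ∨
            2 ≤ (List.map (fun i => i.1) ((k0, d0) :: t)).count k)
          ↔ ((dup k ∨ k = k0) ∨
            ((mb.insert k0 (v0.update d0)).contains k = true ∧ k ∈ List.map (fun i => i.1) t) ∨
            2 ≤ (List.map (fun i => i.1) t).count k) := by
        have hmemc : k ∈ List.map (fun i => i.1) ((k0, d0) :: t) ↔
            (k = k0 ∨ k ∈ List.map (fun i => i.1) t) := by simp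
        have hconti : (mb.insert k0 (v0.update d0)).contains k = true ↔
            (k = k0 ∨ mb.contains k = true) := by
          rw [PySem.Dict.contains_insert]; simp
        by_cases hk : k = k0
        · subst hk
          constructor
          · intro _; exact Or.inl (Or.inr rfl)
          · intro _; exact Or.inr (Or.inl ⟨hc0, hmemc.mpr (Or.inl rfl)⟩)
        · have hcountc : (List.map (fun i => i.1) ((k0, d0) :: t)).count k
              = (List.map (fun i => i.1) t).count k := by
            have hbk : (k0 == k) = false := beq_eq_false_iff_ne.mpr (fun hh => hk hh.symm)
            simp [List.count_cons, hbk]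
          rw [hmemc, hconti, hcountc]
          constructor
          · rintro (h | ⟨hcn, (h | h)⟩ | h)
            · exact Or.inl (Or.inl h)
            · exact absurd h hk
            · exact Or.inr (Or.inl ⟨Or.inr hcn, h⟩)
            · exact Or.inr (Or.inr h)
          · rintro ((h | h) | ⟨(h | hcn), hm⟩ | h)
            · exact Or.inl h
            · exact absurd h hk
            · exact absurd h hk
            · exact Or.inr (Or.inl ⟨hcn, Or.inr hm⟩)
            · exact Or.inr (Or.inr h)
      exact ⟨fun hcnd => H.1 (hiff.mp hcnd), fun hcnd => H.2 (fun hx => hcnd (hiff.mpr hx))⟩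
    · -- fresh outer key: both sides store the same new inner dict
      have hc0' : mb.contains k0 = false := by
        cases h : mb.contains k0
        · rfl
        · exact absurd h hc0
      have hra' : ra.contains k0 = false := by rw [hc]; exact hc0'
      have hdup0 : ¬ dup k0 := by
        intro h
        rw [hd k0 h] at hc0'
        exact Bool.noConfusion hc0'
      have hstepA : pvStepA ra (k0, d0) = ra.insert k0 (PySem.Dict.ofList d0) := by
        unfold pvStepA
        dsimp only
        rw [if_neg (by rw [hra']; exact Bool.false_ne_true)]
      have hstepB : pvStepB mb (k0, d0) = mb.insert k0 (PySem.Dict.ofList d0) := by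
        unfold pvStepB
        dsimp only
        rw [if_neg (by rw [hc0']; exact Bool.false_ne_true)]
      simp only [List.foldl_cons, hstepA, hstepB]
      have hva' : ∀ j v, (ra.insert k0 (PySem.Dict.ofList d0)).get? j = some v → v.keys.Nodup := by
        intro j v hv
        rw [PySem.Dict.get?_insert] at hv
        by_cases hjk : j = k0
        · rw [if_pos hjk] at hv
          rw [← Option.some.inj hv]
          exact PySem.Dict.nodup_keys_ofList _
        · rw [if_neg hjk] at hv
          exact hva _ _ hv
      have hvb' : ∀ j v, (mb.insert k0 (PySem.Dict.ofList d0)).get? j = some v → v.keys.Nodup := by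
        intro j v hv
        rw [PySem.Dict.get?_insert] at hv
        by_cases hjk : j = k0
        · rw [if_pos hjk] at hv
          rw [← Option.some.inj hv]
          exact PySem.Dict.nodup_keys_ofList _
        · rw [if_neg hjk] at hv
          exact hvb _ _ hv
      have hc' : ∀ j, (ra.insert k0 (PySem.Dict.ofList d0)).contains j
          = (mb.insert k0 (PySem.Dict.ofList d0)).contains j := by
        intro j
        rw [PySem.Dict.contains_insert, PySem.Dict.contains_insert, hc]
      have hd' : ∀ j, dup j → (mb.insert k0 (PySem.Dict.ofList d0)).contains j = true := by
        intro j hj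
        rw [PySem.Dict.contains_insert, hd j hj, Bool.or_true]
      have h1' : ∀ j, ¬ dup j →
          (ra.insert k0 (PySem.Dict.ofList d0)).get? j = (mb.insert k0 (PySem.Dict.ofList d0)).get? j := by
        intro j hj
        rw [PySem.Dict.get?_insert, PySem.Dict.get?_insert]
        by_cases hjk : j = k0
        · rw [if_pos hjk, if_pos hjk]
        · rw [if_neg hjk, if_neg hjk]
          exact h1 j hj
      have h2' : ∀ j, dup j →
          (ra.insert k0 (PySem.Dict.ofList d0)).get? j
            = ((mb.insert k0 (PySem.Dict.ofList d0)).get? j).map pvSortD := by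
        intro j hj
        have hjk : j ≠ k0 := fun h => hdup0 (h ▸ hj)
        rw [PySem.Dict.get?_insert, PySem.Dict.get?_insert, if_neg hjk, if_neg hjk]
        exact h2 j hj
      intro k
      have H := ih (ra.insert k0 (PySem.Dict.ofList d0)) (mb.insert k0 (PySem.Dict.ofList d0))
        dup hva' hvb' hc' hd' h1' h2' k
      have hiff : (dup k ∨ (mb.contains k = true ∧ k ∈ List.map (fun i => i.1) ((k0, d0) :: t)) ∨
            2 ≤ (List.map (fun i => i.1) ((k0, d0) :: t)).count k)
          ↔ (dup k ∨
            ((mb.insert k0 (PySem.Dict.ofList d0)).contains k = true ∧ k ∈ List.map (fun i => i.1) t) ∨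
            2 ≤ (List.map (fun i => i.1) t).count k) := by
        have hmemc : k ∈ List.map (fun i => i.1) ((k0, d0) :: t) ↔
            (k = k0 ∨ k ∈ List.map (fun i => i.1) t) := by simp
        have hconti : (mb.insert k0 (PySem.Dict.ofList d0)).contains k = true ↔
            (k = k0 ∨ mb.contains k = true) := by
          rw [PySem.Dict.contains_insert]; simp
        by_cases hk : k = k0
        · subst hk
          have hcountc : (List.map (fun i => i.1) ((k, d0) :: t)).count k
              = (List.map (fun i => i.1) t).count k + 1 := by
            simp
          rw [hmemc, hconti, hcountc]
          constructor
          · rintro (h | ⟨hcn, _⟩ | h)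
            · exact absurd h hdup0
            · rw [hc0'] at hcn; exact Bool.noConfusion hcn
            · exact Or.inr (Or.inl ⟨Or.inl rfl, List.count_pos_iff.mp (by omega)⟩)
          · rintro (h | ⟨_, hm⟩ | h)
            · exact absurd h hdup0
            · have := List.count_pos_iff.mpr hm
              exact Or.inr (Or.inr (by omega))
            · exact Or.inr (Or.inr (by omega))
        · have hcountc : (List.map (fun i => i.1) ((k0, d0) :: t)).count k
              = (List.map (fun i => i.1) t).count k := by
            have hbk : (k0 == k) = false := beq_eq_false_iff_ne.mpr (fun hh => hk hh.symm)
            simp [List.count_cons, hbk]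
          rw [hmemc, hconti, hcountc]
          constructor
          · rintro (h | ⟨hcn, (h | h)⟩ | h)
            · exact Or.inl h
            · exact absurd h hk
            · exact Or.inr (Or.inl ⟨Or.inr hcn, h⟩)
            · exact Or.inr (Or.inr h)
          · rintro (h | ⟨(h | hcn), hm⟩ | h)
            · exact Or.inl h
            · exact absurd h hk
            · exact Or.inr (Or.inl ⟨hcn, Or.inr hm⟩)
            · exact Or.inr (Or.inr h)
      exact ⟨fun hcnd => H.1 (hiff.mp hcnd), fun hcnd => H.2 (fun hx => hcnd (hiff.mpr hx))⟩

-- A's result equals the proof-side intermediate form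
theorem pv_A_eq_old (L : List (String × List (String × String))) :
    joinToDict L = pvOldAlt L := by
  unfold pvOldAlt
  show (PySem.List.sorted (L.foldl pvStepA PySem.Dict.empty).items (fun a => a.1)).map
      (fun p => (p.1, p.2.items))
    = (PySem.List.sorted (L.foldl pvStepB PySem.Dict.empty).items (fun p => p.1)).map
      (fun p => (p.1, if (L.foldl pvStepCnt PySem.Dict.empty).getD p.1 0 > 1
        then PySem.List.sorted p.2.items (fun q => q.1) else p.2.items))
  have hndA := pv_nodup_keys_A L
  have hndB := pv_nodup_keys_B L
  have hkeys : (L.foldl pvStepA PySem.Dict.empty).keys = (L.foldl pvStepB PySem.Dict.empty).keys := by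
    rw [pv_keys_A, pv_keys_B]
  have hvals := pv_vals_nodup_B L PySem.Dict.empty
    (by intro k v hv; rw [PySem.Dict.get?_empty] at hv; cases hv)
  have hmain := pv_main L PySem.Dict.empty PySem.Dict.empty (fun _ => False)
    (by intro k v hv; rw [PySem.Dict.get?_empty] at hv; cases hv)
    (by intro k v hv; rw [PySem.Dict.get?_empty] at hv; cases hv)
    (fun k => rfl)
    (fun k h => h.elim)
    (fun k _ => rfl)
    (fun k h => h.elim)
  rw [pv_sorted_items_map _ hndA PySem.Dict.empty, pv_sorted_items_map _ hndB PySem.Dict.empty,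
    hkeys, List.map_map, List.map_map]
  apply List.map_congr_left
  intro k hk
  have hkm : k ∈ (L.foldl pvStepB PySem.Dict.empty).keys := (PySem.List.mem_sorted _ _ _ _).mp hk
  have hcont : (L.foldl pvStepB PySem.Dict.empty).contains k = true :=
    (PySem.Dict.contains_iff_mem_keys _ _).mpr hkm
  have hsome : ((L.foldl pvStepB PySem.Dict.empty).get? k).isSome := by
    rw [← PySem.Dict.contains_eq_isSome_get?]; exact hcont
  obtain ⟨v, hv⟩ := Option.isSome_iff_exists.mp hsome
  have hgB : (L.foldl pvStepB PySem.Dict.empty).getD k PySem.Dict.empty = v :=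
    PySem.Dict.getD_of_get?_eq_some _ PySem.Dict.empty hv
  have hvnd : v.keys.Nodup := hvals k v hv
  rcases hmain k with ⟨hTrue, hFalse⟩
  simp only [Function.comp_def]
  rw [pv_cnt_getD]
  by_cases hcnt : 2 ≤ (L.map (fun i => i.1)).count k
  · have hA := hTrue (Or.inr (Or.inr hcnt))
    rw [hv] at hA
    have hgA : (L.foldl pvStepA PySem.Dict.empty).getD k PySem.Dict.empty = pvSortD v :=
      PySem.Dict.getD_of_get?_eq_some _ PySem.Dict.empty hA
    rw [hgA, hgB, if_pos (by omega),
      pv_items_sortD v hvnd]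
  · have hB := hFalse (by
      intro h
      rcases h with h | ⟨h, _⟩ | h
      · exact h
      · rw [PySem.Dict.contains_empty] at h; exact Bool.noConfusion h
      · exact hcnt h)
    rw [hv] at hB
    have hgA : (L.foldl pvStepA PySem.Dict.empty).getD k PySem.Dict.empty = v :=
      PySem.Dict.getD_of_get?_eq_some _ PySem.Dict.empty hB
    rw [hgA, hgB, if_neg (by omega)]

-- ===== VERDICT (by name: the statement is the Claim_ definition above) =====
theorem joinToDict_spec : Claim_equal_joinToDict := by
  unfold Claim_equal_joinToDict
  intro L _
  unfold Spec_joinToDict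
  rw [pv_A_eq_old, pv_alt_eq_old]
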